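-- pv_equiv track=rewrite | github.com/minegit/interview | GFG/GFG_DP/find-number-of-solutions-of-a-linear-equation-of-n-variables.py | solve
-- ===== SOURCE A (Python) =====
-- def solve(coeffArr, start, end, rhs):
--     if rhs == 0:
--         return 1
--     result = 0
--     for i in range(start, end+1):
--         if coeffArr[i]<= rhs :
--             result += solve(coeffArr, i, end, rhs-coeffArr[i])
--     return result
-- ===== SOURCE B (Python) =====
-- def solve(coeffArr, start, end, rhs):
--     # Memoized take/skip DP: count multisets of coins summing to rhs.
--     if rhs == 0:
--         return 1
--     coins = [coeffArr[i] for i in range(start, end + 1)]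
--     memo = {}
--     def count(i, r):
--         if r == 0:
--             return 1
--         if r < 0 or i == len(coins):
--             return 0
--         key = (i, r)
--         if key not in memo:
--             take = count(i, r - coins[i]) if coins[i] <= r else 0
--             memo[key] = take + count(i + 1, r)
--         return memo[key]
--     return count(0, rhs)
-- ===== Notes on version B (the rewrite author's own statement) =====
-- stated objective: alternative
-- what changed: A counts solutions by plain recursion summing over coefficient indices, recomputing subproblems exponentially often; B builds the coin list once and runs a memoized take-or-skip counting DP over (coin index, remaining value) states, so each state is computed once.
-- outside the precondition, e.g. on solve([-5], 0, 0, -5): A returns 1, B returns 0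
import Mathlib
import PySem

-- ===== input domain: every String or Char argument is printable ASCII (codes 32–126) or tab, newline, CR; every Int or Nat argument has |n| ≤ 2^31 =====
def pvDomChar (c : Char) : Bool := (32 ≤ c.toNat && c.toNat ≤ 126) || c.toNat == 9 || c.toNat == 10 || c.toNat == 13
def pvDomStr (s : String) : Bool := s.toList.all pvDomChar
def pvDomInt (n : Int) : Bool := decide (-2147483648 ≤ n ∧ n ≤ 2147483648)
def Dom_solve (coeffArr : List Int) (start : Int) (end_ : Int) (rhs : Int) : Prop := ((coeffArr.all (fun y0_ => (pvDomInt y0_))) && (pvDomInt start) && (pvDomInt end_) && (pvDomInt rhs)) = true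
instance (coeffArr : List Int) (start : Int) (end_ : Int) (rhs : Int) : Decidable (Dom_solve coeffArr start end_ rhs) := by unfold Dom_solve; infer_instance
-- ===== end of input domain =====

-- B replaces A's exponential recursion over coefficient indices by a memoized take-or-skip
-- counting DP over (coin index, remaining value) states (objective: alternative).

-- ===== PORT A =====
-- A's recursion does not terminate in Lean's sense on inputs where a visited coefficient is ≤ 0
-- and ≤ rhs (Python recurses without bound there; such inputs are outside Pre_solve).  The port
-- therefore carries a fuel counter rhs.natAbs + 1, which is sufficient wherever Pre_solve holds:
-- on every recursive call of such a run, |rhs| strictly decreases (A_bridge below).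
def solveFuel (coeffArr : List Int) (end_ : Int) : Nat → Int → Int → Int
  | 0, _, _ => 0
  | fuel + 1, start, rhs =>
    if rhs = 0 then 1
    else
      (PySem.List.pyRange start (end_ + 1) 1).foldl
        (fun result i =>
          match PySem.List.pyGet? coeffArr i with
          | some c => if c ≤ rhs then result + solveFuel coeffArr end_ fuel i (rhs - c) else result
          | none => result)  -- none = Python IndexError; excluded by Pre_solve
        0

def solve (coeffArr : List Int) (start : Int) (end_ : Int) (rhs : Int) : Int :=
  solveFuel coeffArr end_ (rhs.natAbs + 1) start rhs

-- ===== PORT B =====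
-- Port of B's nested memoized helper `count(i, r)`; the memo dict is threaded explicitly.
-- B's recursion terminates on Pre_solve inputs (each call lowers r by a positive coin or raises i);
-- the fuel counter rhs.toNat + len(coins) + 1 is sufficient there (memo_bridge below).
def countMemo (coins : List Int) : Nat → Int → Int → PySem.Dict (Int × Int) Int → Int × PySem.Dict (Int × Int) Int
  | 0, _, _, memo => (0, memo)
  | fuel + 1, i, r, memo =>
    if r = 0 then (1, memo)
    else if r < 0 ∨ i = (coins.length : Int) then (0, memo)
    else
      match memo.get? (i, r) with
      | some v => (v, memo)
      | none =>
        let c := PySem.List.pyGetD coins i 0  -- coins[i]; 0 ≤ i < len(coins) here, so exact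
        let t := if c ≤ r then countMemo coins fuel i (r - c) memo else ((0 : Int), memo)
        let sk := countMemo coins fuel (i + 1) r t.2
        (t.1 + sk.1, (sk.2).insert (i, r) (t.1 + sk.1))

def solve_alt (coeffArr : List Int) (start : Int) (end_ : Int) (rhs : Int) : Int :=
  if rhs = 0 then 1
  else
    -- coins = [coeffArr[i] for i in range(start, end+1)]; IndexError excluded by Pre_solve
    let coins := (PySem.List.pyRange start (end_ + 1) 1).map (fun i => PySem.List.pyGetD coeffArr i 0)
    (countMemo coins (rhs.toNat + coins.length + 1) 0 rhs PySem.Dict.empty).1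

-- ===== PRECONDITION & SPEC =====
-- Pre_solve excludes only the inputs on which A raises: an out-of-range loop index (IndexError)
-- and a visited nonpositive coefficient c ≤ rhs, on which A recurses without bound
-- (RecursionError) — except in the rare degenerate case where such a chain of nonpositive coins
-- happens to hit rhs = 0 exactly, where A returns; negative coefficients are outside the natural
-- non-negative coin-counting domain, and B's DP (which cuts off at r < 0) returns 0 there.
def Pre_solve (coeffArr : List Int) (start : Int) (end_ : Int) (rhs : Int) : Prop :=
  rhs = 0 ∨
    ((end_ < start ∨ (-(coeffArr.length : Int) ≤ start ∧ end_ < (coeffArr.length : Int))) ∧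
      ∀ k ∈ List.range coeffArr.length,
        ((start ≤ (k : Int) ∧ (k : Int) ≤ end_) ∨
          (start ≤ (k : Int) - (coeffArr.length : Int) ∧ (k : Int) - (coeffArr.length : Int) ≤ end_)) →
        coeffArr.getD k 0 ≤ rhs → 0 < coeffArr.getD k 0)
instance (coeffArr : List Int) (start : Int) (end_ : Int) (rhs : Int) : Decidable (Pre_solve coeffArr start end_ rhs) := by unfold Pre_solve; infer_instance

def pvWitness_solve : List Int × Int × Int × Int := ([1, 2], 0, 1, 4)

def Spec_solve (coeffArr : List Int) (start : Int) (end_ : Int) (rhs : Int) (out : Int) : Prop := out = solve_alt coeffArr start end_ rhs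
instance (coeffArr : List Int) (start : Int) (end_ : Int) (rhs : Int) (out : Int) : Decidable (Spec_solve coeffArr start end_ rhs out) := by unfold Spec_solve; infer_instance

-- ===== CLAIM (what is proved, stated in full; the proofs are below) =====
def Claim_equal_solve : Prop := ∀ (coeffArr : List Int) (start : Int) (end_ : Int) (rhs : Int), Dom_solve coeffArr start end_ rhs → Pre_solve coeffArr start end_ rhs → Spec_solve coeffArr start end_ rhs (solve coeffArr start end_ rhs)

-- ===== LEMMAS AND PROOFS =====

-- Number of multisets over the coin list cs summing to r ("take the head coin again, or drop it").
-- The 0 < c guard makes W total; on Pre_solve inputs it coincides with A's c ≤ r test.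
def W : List Int → Int → Int
  | cs, r =>
    if _h0 : r = 0 then 1
    else
      match cs with
      | [] => 0
      | c :: t => (if _h : 0 < c ∧ c ≤ r then W (c :: t) (r - c) else 0) + W t r
termination_by cs r => (r.toNat, cs.length)
decreasing_by
  · exact Prod.Lex.left _ _ (by omega)
  · exact Prod.Lex.right _ (by simp)

def coinsFrom (coeffArr : List Int) (start end_ : Int) : List Int :=
  (PySem.List.pyRange start (end_ + 1) 1).map (fun i => PySem.List.pyGetD coeffArr i 0)

lemma W_zero (cs : List Int) : W cs 0 = 1 := by
  rw [W.eq_def]; simp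

lemma W_nil (r : Int) : W [] r = if r = 0 then 1 else 0 := by
  rw [W.eq_def]; split; simp

lemma W_cons (c : Int) (t : List Int) (r : Int) (h : r ≠ 0) :
    W (c :: t) r = (if 0 < c ∧ c ≤ r then W (c :: t) (r - c) else 0) + W t r := by
  rw [W.eq_def]; simp [h]

lemma W_neg (cs : List Int) (r : Int) (h : r < 0) : W cs r = 0 := by
  induction cs with
  | nil => rw [W_nil]; simp [show r ≠ 0 by omega]
  | cons c t ih =>
    rw [W_cons c t r (by omega)]
    have : ¬ (0 < c ∧ c ≤ r) := by omega
    simp [this, ih]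

lemma sum_body (coeffArr : List Int) (end_ : Int) (fuel : Nat) (rhs : Int) (l : List Int) (a : Int) :
    l.foldl (fun result i =>
      match PySem.List.pyGet? coeffArr i with
      | some c => if c ≤ rhs then result + solveFuel coeffArr end_ fuel i (rhs - c) else result
      | none => result) a
    = a + (l.map (fun i =>
      match PySem.List.pyGet? coeffArr i with
      | some c => if c ≤ rhs then solveFuel coeffArr end_ fuel i (rhs - c) else 0
      | none => 0)).sum := by
  induction l generalizing a with
  | nil => simp
  | cons x xs ih =>
    simp only [List.foldl_cons, List.map_cons, List.sum_cons, ih]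
    cases h : PySem.List.pyGet? coeffArr x with
    | none => simp
    | some c =>
      by_cases hcr : c ≤ rhs
      · simp [hcr]; ring
      · simp [hcr]

lemma A_bridge (coeffArr : List Int) (end_ : Int) :
    ∀ (fuel : Nat) (start rhs : Int), rhs.toNat < fuel →
    (∀ i ∈ PySem.List.pyRange start (end_ + 1) 1,
      (PySem.List.pyGet? coeffArr i).isSome = true ∧
      (PySem.List.pyGetD coeffArr i 0 ≤ rhs → 0 < PySem.List.pyGetD coeffArr i 0)) →
    solveFuel coeffArr end_ fuel start rhs = W (coinsFrom coeffArr start end_) rhs := by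
  intro fuel
  induction fuel with
  | zero => intro start rhs h _; omega
  | succ n ih =>
    intro start rhs hf hpre
    by_cases h0 : rhs = 0
    · subst h0; simp [solveFuel, W_zero]
    · have main : ∀ (k : Nat) (start : Int), (end_ + 1 - start).toNat = k →
          (∀ i ∈ PySem.List.pyRange start (end_ + 1) 1,
            (PySem.List.pyGet? coeffArr i).isSome = true ∧
            (PySem.List.pyGetD coeffArr i 0 ≤ rhs → 0 < PySem.List.pyGetD coeffArr i 0)) →
          solveFuel coeffArr end_ (n + 1) start rhs = W (coinsFrom coeffArr start end_) rhs := by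
        intro k
        induction k with
        | zero =>
          intro s hk _
          have hs : end_ + 1 ≤ s := by omega
          simp only [solveFuel, coinsFrom, PySem.List.pyRange_one_eq_nil hs, List.foldl_nil,
            List.map_nil, h0, if_false]
          rw [W_nil]; simp [h0]
        | succ m ihk =>
          intro s hk hpre
          have hlt : s < end_ + 1 := by omega
          obtain ⟨hsome, hpos⟩ := hpre s ((PySem.List.mem_pyRange_one).2 ⟨le_refl _, hlt⟩)
          obtain ⟨c, hc⟩ := Option.isSome_iff_exists.1 hsome
          have hgd : PySem.List.pyGetD coeffArr s 0 = c := by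
            simp [PySem.List.pyGetD, hc]
          have hpre' : ∀ i ∈ PySem.List.pyRange (s + 1) (end_ + 1) 1,
              (PySem.List.pyGet? coeffArr i).isSome = true ∧
              (PySem.List.pyGetD coeffArr i 0 ≤ rhs → 0 < PySem.List.pyGetD coeffArr i 0) := by
            intro i hi
            exact hpre i ((PySem.List.mem_pyRange_one).2
              ⟨by have := (PySem.List.mem_pyRange_one).1 hi; omega,
               by have := (PySem.List.mem_pyRange_one).1 hi; omega⟩)
          have htail := ihk (s + 1) (by omega) hpre'
          -- unfold one loop step of A
          rw [show solveFuel coeffArr end_ (n + 1) s rhs =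
              (PySem.List.pyRange s (end_ + 1) 1).foldl
                (fun result i =>
                  match PySem.List.pyGet? coeffArr i with
                  | some c => if c ≤ rhs then result + solveFuel coeffArr end_ n i (rhs - c) else result
                  | none => result) 0 from by simp [solveFuel, h0]]
          rw [PySem.List.pyRange_one_cons hlt, sum_body, List.map_cons, List.sum_cons]
          rw [show solveFuel coeffArr end_ (n + 1) (s + 1) rhs =
              (PySem.List.pyRange (s + 1) (end_ + 1) 1).foldl
                (fun result i =>
                  match PySem.List.pyGet? coeffArr i with
                  | some c => if c ≤ rhs then result + solveFuel coeffArr end_ n i (rhs - c) else result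
                  | none => result) 0 from by simp [solveFuel, h0]] at htail
          rw [sum_body] at htail
          -- unfold one cons of the coin list
          have hcoins : coinsFrom coeffArr s end_ =
              c :: coinsFrom coeffArr (s + 1) end_ := by
            simp [coinsFrom, PySem.List.pyRange_one_cons hlt, hgd]
          rw [hcoins, W_cons c _ rhs h0, ← hcoins, hc]
          rw [show (match some c with
              | some c => if c ≤ rhs then solveFuel coeffArr end_ n s (rhs - c) else 0
              | none => (0 : Int)) = if c ≤ rhs then solveFuel coeffArr end_ n s (rhs - c) else 0
            from rfl]
          by_cases hcle : c ≤ rhs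
          · have hcpos : 0 < c := by
              rw [← hgd]; exact hpos (by rw [hgd]; exact hcle)
            have hfr : (rhs - c).toNat < n := by omega
            have hprec : ∀ i ∈ PySem.List.pyRange s (end_ + 1) 1,
                (PySem.List.pyGet? coeffArr i).isSome = true ∧
                (PySem.List.pyGetD coeffArr i 0 ≤ rhs - c → 0 < PySem.List.pyGetD coeffArr i 0) := by
              intro i hi
              exact ⟨(hpre i hi).1, fun h => (hpre i hi).2 (by omega)⟩
            rw [ih s (rhs - c) hfr hprec, if_pos hcle,
              if_pos (show 0 < c ∧ c ≤ rhs from ⟨hcpos, hcle⟩), ← htail]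
            ring
          · have hng : ¬ (0 < c ∧ c ≤ rhs) := by tauto
            rw [if_neg hcle, if_neg hng, ← htail]
      exact main _ start rfl hpre

-- Pre_solve, stated positionally over the array, gives A's per-visited-index facts.
lemma pre_elems (coeffArr : List Int) (start end_ rhs : Int)
    (hval : end_ < start ∨ (-(coeffArr.length : Int) ≤ start ∧ end_ < (coeffArr.length : Int)))
    (hpos : ∀ k ∈ List.range coeffArr.length,
      ((start ≤ (k : Int) ∧ (k : Int) ≤ end_) ∨
        (start ≤ (k : Int) - (coeffArr.length : Int) ∧ (k : Int) - (coeffArr.length : Int) ≤ end_)) →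
      coeffArr.getD k 0 ≤ rhs → 0 < coeffArr.getD k 0) :
    ∀ i ∈ PySem.List.pyRange start (end_ + 1) 1,
      (PySem.List.pyGet? coeffArr i).isSome = true ∧
      (PySem.List.pyGetD coeffArr i 0 ≤ rhs → 0 < PySem.List.pyGetD coeffArr i 0) := by
  intro i hi
  obtain ⟨h1, h2⟩ := (PySem.List.mem_pyRange_one).1 hi
  rcases hval with hlt | ⟨hlo, hhi⟩
  · omega
  have hrange : PySem.Raise.InRange coeffArr.length i := ⟨by omega, by omega⟩
  constructor
  · rw [Option.isSome_iff_ne_none]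
    intro hn
    exact ((PySem.List.pyGet?_eq_none_iff coeffArr i).1 hn) hrange
  · by_cases hi0 : 0 ≤ i
    · have hilt : i < (coeffArr.length : Int) := hrange.2
      rw [PySem.List.pyGetD_eq_getElem coeffArr 0 hi0 hilt]
      have hk : i.toNat ∈ List.range coeffArr.length := List.mem_range.2 (by omega)
      intro hle
      have := hpos i.toNat hk (Or.inl ⟨by omega, by omega⟩)
        (by rwa [List.getD_eq_getElem coeffArr 0 (by omega : i.toNat < coeffArr.length)])
      rwa [List.getD_eq_getElem coeffArr 0 (by omega : i.toNat < coeffArr.length)] at this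
    · have hkpos : 0 < (-i).toNat := by omega
      have hkle : (-i).toNat ≤ coeffArr.length := by omega
      have hrw : PySem.List.pyGetD coeffArr i 0 =
          coeffArr[coeffArr.length - (-i).toNat] := by
        have h := PySem.List.pyGetD_neg_natCast coeffArr ((-i).toNat) (0 : Int) hkpos hkle
        rw [show -(((-i).toNat : Nat) : Int) = i by omega] at h
        exact h
      rw [hrw]
      have hk : coeffArr.length - (-i).toNat ∈ List.range coeffArr.length :=
        List.mem_range.2 (by omega)
      intro hle
      have := hpos (coeffArr.length - (-i).toNat) hk (Or.inr ⟨by omega, by omega⟩)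
        (by rwa [List.getD_eq_getElem coeffArr 0
          (by omega : coeffArr.length - (-i).toNat < coeffArr.length)])
      rwa [List.getD_eq_getElem coeffArr 0
        (by omega : coeffArr.length - (-i).toNat < coeffArr.length)] at this


lemma memo_bridge (coins : List Int) (hpos : ∀ c ∈ coins, 0 < c) :
    ∀ (fuel : Nat) (i r : Int) (memo : PySem.Dict (Int × Int) Int),
    0 ≤ i → i ≤ (coins.length : Int) →
    r.toNat + (coins.length - i.toNat) < fuel →
    (∀ p v, memo.get? p = some v → v = W (coins.drop p.1.toNat) p.2) →
    (countMemo coins fuel i r memo).1 = W (coins.drop i.toNat) r ∧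
    (∀ p v, (countMemo coins fuel i r memo).2.get? p = some v → v = W (coins.drop p.1.toNat) p.2) := by
  intro fuel
  induction fuel with
  | zero => intro i r memo _ _ hf _; omega
  | succ n ih =>
    intro i r memo hi0 hile hf hmemo
    by_cases hr0 : r = 0
    · subst hr0
      simp only [countMemo]
      exact ⟨(W_zero _).symm, hmemo⟩
    · by_cases hstop : r < 0 ∨ i = (coins.length : Int)
      · simp only [countMemo, if_neg hr0, if_pos hstop]
        refine ⟨?_, hmemo⟩
        rcases hstop with hneg | hend
        · exact (W_neg _ _ hneg).symm
        · rw [show i.toNat = coins.length by omega, List.drop_length, W_nil, if_neg hr0]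
      · push Not at hstop
        obtain ⟨hrneg, hine⟩ := hstop
        have hilen : i < (coins.length : Int) := by omega
        have hrpos : 0 < r := by omega
        have hitn : i.toNat < coins.length := by omega
        have hcel : PySem.List.pyGetD coins i 0 = coins[i.toNat] :=
          PySem.List.pyGetD_eq_getElem coins 0 hi0 hilen
        have hc : 0 < PySem.List.pyGetD coins i 0 := by
          rw [hcel]; exact hpos _ (List.getElem_mem hitn)
        have hdrop : coins.drop i.toNat = PySem.List.pyGetD coins i 0 :: coins.drop (i.toNat + 1) := by
          rw [hcel]; exact List.drop_eq_getElem_cons hitn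
        cases hget : memo.get? (i, r) with
        | some v =>
          simp only [countMemo, if_neg hr0, if_neg (by push Not; exact ⟨hrneg, hine⟩ :
            ¬ (r < 0 ∨ i = (coins.length : Int))), hget]
          exact ⟨hmemo (i, r) v hget, hmemo⟩
        | none =>
          have hred : countMemo coins (n + 1) i r memo =
              (let c := PySem.List.pyGetD coins i 0
               let t := if c ≤ r then countMemo coins n i (r - c) memo else ((0 : Int), memo)
               let sk := countMemo coins n (i + 1) r t.2
               (t.1 + sk.1, (sk.2).insert (i, r) (t.1 + sk.1))) := by
            simp only [countMemo, if_neg hr0, if_neg (by push Not; exact ⟨hrneg, hine⟩ :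
              ¬ (r < 0 ∨ i = (coins.length : Int))), hget]
          rw [hred]
          by_cases hcr : PySem.List.pyGetD coins i 0 ≤ r
          · obtain ⟨ht1, ht2⟩ := ih i (r - PySem.List.pyGetD coins i 0) memo hi0 (by omega)
              (by omega) hmemo
            obtain ⟨hs1, hs2⟩ := ih (i + 1) r
              ((countMemo coins n i (r - PySem.List.pyGetD coins i 0) memo).2)
              (by omega) (by omega) (by omega) ht2
            rw [show (i + 1).toNat = i.toNat + 1 by omega] at hs1
            simp only [if_pos hcr]
            have hval : (countMemo coins n i (r - PySem.List.pyGetD coins i 0) memo).1 +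
                (countMemo coins n (i + 1) r
                  ((countMemo coins n i (r - PySem.List.pyGetD coins i 0) memo).2)).1 =
                W (coins.drop i.toNat) r := by
              rw [ht1, hs1, hdrop, W_cons _ _ _ hr0, if_pos ⟨hc, hcr⟩, ← hdrop]
            refine ⟨hval, ?_⟩
            intro p v hp
            by_cases hpk : p = (i, r)
            · subst hpk
              rw [PySem.Dict.get?_insert_self] at hp
              cases hp
              exact hval
            · rw [PySem.Dict.get?_insert_of_ne _ _ hpk] at hp
              exact hs2 p v hp
          · obtain ⟨hs1, hs2⟩ := ih (i + 1) r memo (by omega) (by omega) (by omega) hmemo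
            rw [show (i + 1).toNat = i.toNat + 1 by omega] at hs1
            simp only [if_neg hcr]
            have hval : (0 : Int) + (countMemo coins n (i + 1) r memo).1 =
                W (coins.drop i.toNat) r := by
              rw [hs1, hdrop, W_cons _ _ _ hr0, if_neg (by tauto)]
            refine ⟨hval, ?_⟩
            intro p v hp
            by_cases hpk : p = (i, r)
            · subst hpk
              rw [PySem.Dict.get?_insert_self] at hp
              cases hp
              exact hval
            · rw [PySem.Dict.get?_insert_of_ne _ _ hpk] at hp
              exact hs2 p v hp

lemma B_bridge (coeffArr : List Int) (start end_ rhs : Int)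
    (hpos : ∀ c ∈ coinsFrom coeffArr start end_, 0 < c) :
    solve_alt coeffArr start end_ rhs = W (coinsFrom coeffArr start end_) rhs := by
  unfold solve_alt
  by_cases hr0 : rhs = 0
  · subst hr0; rw [if_pos rfl, W_zero]
  rw [if_neg hr0]
  rw [show (PySem.List.pyRange start (end_ + 1) 1).map (fun i => PySem.List.pyGetD coeffArr i 0)
      = coinsFrom coeffArr start end_ from rfl]
  have hb := memo_bridge (coinsFrom coeffArr start end_) hpos
    (rhs.toNat + (coinsFrom coeffArr start end_).length + 1) 0 rhs PySem.Dict.empty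
    (le_refl 0) (by positivity) (by omega)
    (by intro p v hp; simp [pysem] at hp)
  have := hb.1
  rwa [Int.toNat_zero, List.drop_zero] at this

-- ===== VERDICT (by name: the statement is the Claim_ definition above) =====
theorem solve_spec : Claim_equal_solve := by
  intro coeffArr start end_ rhs _hdom hpre0
  unfold Spec_solve
  rcases hpre0 with h0 | hpre0
  · subst h0
    simp [solve, solveFuel, solve_alt]
  · have hpre := pre_elems coeffArr start end_ rhs hpre0.1 hpre0.2
    have hA : solve coeffArr start end_ rhs = W (coinsFrom coeffArr start end_) rhs :=
      A_bridge coeffArr end_ (rhs.natAbs + 1) start rhs (by omega) hpre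
    rcases lt_trichotomy rhs 0 with hneg | hz | hposr
    · rw [hA, W_neg _ _ hneg]
      simp [solve_alt, countMemo, show ¬ rhs = 0 by omega, hneg]
    · subst hz
      rw [hA, W_zero]
      simp [solve_alt]
    · have hpos : ∀ c ∈ coinsFrom coeffArr start end_, 0 < c := by
        intro c hcmem
        obtain ⟨i, hi, hci⟩ := List.mem_map.1 hcmem
        by_cases hle : c ≤ rhs
        · rw [← hci]; exact (hpre i hi).2 (by rw [hci]; exact hle)
        · omega
      rw [hA, B_bridge coeffArr start end_ rhs hpos]
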